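-- pv_equiv track=rewrite | github.com/dojorio/dojolive | 2020/20200704 - go - python/go_test.py | nas_linhas
-- ===== SOURCE A (Python) =====
-- def nas_linhas(tabuleiro, jogador, jogada):
--     for n, linha in enumerate(tabuleiro):
--         ultima_casa = None
--         for casa, peça in enumerate(linha):
--             if peça == jogador:
--                 if ultima_casa is not None:
--                     for casa_anterior in range(ultima_casa, casa):
--                         linha[casa_anterior] = jogador
--                 ultima_casa = casa
--     return tabuleiro
-- ===== SOURCE B (Python) =====
-- def nas_linhas(tabuleiro, jogador, jogada):
--     for linha in tabuleiro:
--         idx = [i for i, x in enumerate(linha) if x == jogador]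
--         if idx:
--             linha[idx[0]:idx[-1] + 1] = [jogador] * (idx[-1] - idx[0] + 1)
--     return tabuleiro
-- ===== Notes on version B (the rewrite author's own statement) =====
-- stated objective: simpler
-- what changed: A fills gaps incrementally with a running previous-mark pointer and a nested per-gap assignment loop; B computes the occurrence positions of jogador in one comprehension and bulk-fills between the first and last occurrence with a single slice assignment.
import Mathlib
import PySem

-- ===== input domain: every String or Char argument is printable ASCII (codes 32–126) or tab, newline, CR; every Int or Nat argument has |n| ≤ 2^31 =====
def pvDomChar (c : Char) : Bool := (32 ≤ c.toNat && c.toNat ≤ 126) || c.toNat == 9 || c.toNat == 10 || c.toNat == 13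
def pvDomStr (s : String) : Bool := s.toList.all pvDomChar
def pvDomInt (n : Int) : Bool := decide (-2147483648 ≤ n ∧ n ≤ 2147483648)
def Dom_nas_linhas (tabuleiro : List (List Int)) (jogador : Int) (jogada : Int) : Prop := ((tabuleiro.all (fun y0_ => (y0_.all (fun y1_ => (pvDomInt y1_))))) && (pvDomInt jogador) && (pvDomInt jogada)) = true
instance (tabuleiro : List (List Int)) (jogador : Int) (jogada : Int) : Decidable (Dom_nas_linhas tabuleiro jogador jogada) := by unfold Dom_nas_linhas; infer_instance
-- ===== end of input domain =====

-- B replaces A's running previous-mark pointer with incremental gap filling by a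
-- compute-occurrence-positions-then-bulk-fill-once decomposition (simpler).
-- A mutates the rows of `tabuleiro` in place and returns it; B performs the same
-- in-place fills; the theorems below are about the returned value.

-- ===== PORT A =====

-- inner `for casa_anterior in range(ultima_casa, casa): linha[casa_anterior] = jogador`
def pvFillLoop (cur : List Int) (jogador : Int) (ultima casa : Nat) : List Int :=
  (List.range' ultima (casa - ultima)).foldl (fun l i => l.set i jogador) cur

-- middle loop: `for casa, peça in enumerate(linha): …` (state = current row, ultima_casa)
def pvRowA (linha : List Int) (jogador : Int) : List Int :=
  ((List.range linha.length).foldl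
    (fun (st : List Int × Option Nat) casa =>
      let peça := st.1.getD casa 0
      if peça == jogador then
        (match st.2 with
         | some u => pvFillLoop st.1 jogador u casa
         | none => st.1,
         some casa)
      else st)
    (linha, none)).1

def nas_linhas (tabuleiro : List (List Int)) (jogador : Int) (jogada : Int) : List (List Int) :=
  tabuleiro.map (fun linha => pvRowA linha jogador)

-- ===== PORT B =====

-- `enumerate(linha)` with Nat indices
def pvEnum (xs : List Int) : List (Nat × Int) := (List.range xs.length).zip xs

-- `idx = [i for i, x in enumerate(linha) if x == jogador]`, then one slice assignment
def pvRowB (linha : List Int) (jogador : Int) : List Int :=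
  let idx := ((pvEnum linha).filter (fun p => p.2 == jogador)).map Prod.fst
  match idx with
  | [] => linha
  | f :: rest =>
    let l := (f :: rest).getLastD 0
    linha.take f ++ List.replicate (l - f + 1) jogador ++ linha.drop (l + 1)

def nas_linhas_alt (tabuleiro : List (List Int)) (jogador : Int) (jogada : Int) : List (List Int) :=
  tabuleiro.map (fun linha => pvRowB linha jogador)

-- ===== PRECONDITION & SPEC =====
def Spec_nas_linhas (tabuleiro : List (List Int)) (jogador : Int) (jogada : Int) (out : List (List Int)) : Prop := out = nas_linhas_alt tabuleiro jogador jogada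
instance (tabuleiro : List (List Int)) (jogador : Int) (jogada : Int) (out : List (List Int)) : Decidable (Spec_nas_linhas tabuleiro jogador jogada out) := by unfold Spec_nas_linhas; infer_instance

-- ===== CLAIM (what is proved, stated in full; the proofs are below) =====
def Claim_equal_nas_linhas : Prop := ∀ (tabuleiro : List (List Int)) (jogador : Int) (jogada : Int), Dom_nas_linhas tabuleiro jogador jogada → Spec_nas_linhas tabuleiro jogador jogada (nas_linhas tabuleiro jogador jogada)

-- ===== LEMMAS AND PROOFS =====

-- the row filled with `jogador` from position f to position l (inclusive)
def pvFillR (linha : List Int) (jogador : Int) (f l : Nat) : List Int :=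
  linha.take f ++ List.replicate (l - f + 1) jogador ++ linha.drop (l + 1)

-- occurrence positions of jogador among the first n cells
def pvOccs (linha : List Int) (jogador : Int) (n : Nat) : List Nat :=
  (List.range n).filter (fun i => linha.getD i 0 == jogador)

theorem pvFillR_length (linha : List Int) (j : Int) (f l : Nat) (hf : f ≤ l)
    (hl : l < linha.length) : (pvFillR linha j f l).length = linha.length := by
  simp [pvFillR]; omega

theorem pvFillR_getD_high (linha : List Int) (j : Int) (f l n : Nat) (hf : f ≤ l)
    (hl : l < linha.length) (hn : l < n) :
    (pvFillR linha j f l).getD n 0 = linha.getD n 0 := by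
  have hlen1 : (linha.take f ++ List.replicate (l - f + 1) j).length = l + 1 := by
    simp; omega
  rw [pvFillR, List.getD_eq_getElem?_getD, List.getD_eq_getElem?_getD,
      List.getElem?_append_right (by rw [hlen1]; omega), List.getElem?_drop, hlen1]
  congr 2
  omega

theorem pvFillLoop_eq (j : Int) (k u : Nat) (cur : List Int) (h : u + k ≤ cur.length) :
    (List.range' u k).foldl (fun l i => l.set i j) cur
      = cur.take u ++ List.replicate k j ++ cur.drop (u + k) := by
  induction k generalizing u cur with
  | zero => simp
  | succ k ih =>
    rw [List.range'_succ, List.foldl_cons, ih (u + 1) _ (by simp; omega)]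
    have hu : u < cur.length := by omega
    have hlt : (cur.take u).length = u := by simp; omega
    rw [List.set_eq_take_append_cons_drop, if_pos hu]
    have h1 : (cur.take u ++ j :: cur.drop (u + 1)).take (u + 1)
        = cur.take u ++ [j] := by
      rw [List.take_append, hlt, List.take_take]
      have h11 : min (u + 1) u = u := by omega
      have h12 : u + 1 - u = 1 := by omega
      rw [h11, h12]
      rfl
    have h2 : (cur.take u ++ j :: cur.drop (u + 1)).drop (u + 1 + k)
        = cur.drop (u + 1 + k) := by
      rw [List.drop_append, hlt, List.drop_of_length_le (by rw [hlt]; omega)]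
      have h21 : u + 1 + k - u = k + 1 := by omega
      rw [h21, List.nil_append, List.drop_succ_cons, List.drop_drop]
    rw [h1, h2]
    have h3 : u + (k + 1) = u + 1 + k := by omega
    rw [h3, List.replicate_succ]
    simp

theorem pvFillR_self (linha : List Int) (j : Int) (n : Nat) (hn : n < linha.length)
    (hv : linha.getD n 0 = j) : pvFillR linha j n n = linha := by
  simp only [pvFillR, Nat.sub_self]
  have : linha.drop n = linha[n] :: linha.drop (n + 1) := List.drop_eq_getElem_cons hn
  have hv' : linha[n] = j := by simpa [List.getD, List.getElem?_eq_getElem hn] using hv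
  calc linha.take n ++ [j] ++ linha.drop (n + 1)
      = linha.take n ++ linha.drop n := by rw [this, hv']; simp
    _ = linha := List.take_append_drop n linha

theorem pvFillR_extend (linha : List Int) (j : Int) (f l n : Nat) (hf : f ≤ l) (hl : l < n)
    (hn : n < linha.length) (hv : linha.getD n 0 = j) :
    pvFillLoop (pvFillR linha j f l) j l n = pvFillR linha j f n := by
  have hlen := pvFillR_length linha j f l hf (by omega)
  rw [pvFillLoop, pvFillLoop_eq j (n - l) l _ (by omega)]
  have hA : (linha.take f).length = f := by simp; omega
  have hAB : (linha.take f ++ List.replicate (l - f + 1) j).length = l + 1 := by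
    simp; omega
  have htake : (pvFillR linha j f l).take l = linha.take f ++ List.replicate (l - f) j := by
    rw [pvFillR, List.take_append, List.take_append, hA, hAB]
    rw [List.take_of_length_le (by rw [hA]; omega), List.take_replicate]
    have h11 : min (l - f) (l - f + 1) = l - f := by omega
    have h12 : l - (l + 1) = 0 := by omega
    rw [h11, h12]
    simp
  have hdrop : (pvFillR linha j f l).drop (l + (n - l)) = linha.drop n := by
    have hnl : l + (n - l) = n := by omega
    rw [hnl, pvFillR, List.drop_append, List.drop_append, hA, hAB]
    rw [List.drop_of_length_le (by rw [hA]; omega),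
        List.drop_of_length_le (by simp; omega), List.drop_drop]
    simp only [List.nil_append]
    congr 1
    omega
  rw [htake, hdrop, pvFillR]
  have hdn : linha.drop n = linha[n] :: linha.drop (n + 1) := List.drop_eq_getElem_cons hn
  have hv' : linha[n] = j := by simpa [List.getD, List.getElem?_eq_getElem hn] using hv
  rw [hdn, hv']
  have hrep : List.replicate (l - f) j ++ (List.replicate (n - l) j ++ (j :: linha.drop (n + 1)))
      = List.replicate (n - f + 1) j ++ linha.drop (n + 1) := by
    rw [show (j :: linha.drop (n + 1)) = List.replicate 1 j ++ linha.drop (n + 1) from rfl,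
        ← List.append_assoc, ← List.append_assoc,
        List.replicate_append_replicate, List.replicate_append_replicate]
    have h14 : l - f + (n - l) + 1 = n - f + 1 := by omega
    rw [h14]
  simp only [List.append_assoc]
  rw [hrep]

theorem pvOccs_succ (linha : List Int) (j : Int) (n : Nat) :
    pvOccs linha j (n + 1)
      = pvOccs linha j n ++ (if linha.getD n 0 == j then [n] else []) := by
  simp only [pvOccs, List.range_succ, List.filter_append, List.filter_cons, List.filter_nil]

theorem pvOccs_mem_lt (linha : List Int) (j : Int) (n i : Nat) (h : i ∈ pvOccs linha j n) :
    i < n := by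
  simp only [pvOccs, List.mem_filter, List.mem_range] at h
  exact h.1

theorem pvOccs_sorted (linha : List Int) (j : Int) (n : Nat) :
    (pvOccs linha j n).Pairwise (· < ·) :=
  List.Pairwise.filter _ (List.pairwise_lt_range)

theorem pvMem_of_getLast? (xs : List Nat) (l : Nat) (h : xs.getLast? = some l) : l ∈ xs := by
  cases xs with
  | nil => simp at h
  | cons a rest =>
    have hne : (a :: rest) ≠ [] := by simp
    rw [List.getLast?_eq_some_getLast hne] at h
    have h2 := Option.some.inj h
    exact h2 ▸ List.getLast_mem hne

theorem pvHead_le_getLast (xs : List Nat) (h : xs.Pairwise (· < ·)) (f l : Nat)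
    (hf : xs.head? = some f) (hl : xs.getLast? = some l) : f ≤ l := by
  cases xs with
  | nil => simp at hf
  | cons a rest =>
    simp at hf
    subst hf
    have hmem : l ∈ a :: rest := pvMem_of_getLast? _ _ hl
    rcases List.mem_cons.mp hmem with h1 | h2
    · omega
    · exact le_of_lt ((List.pairwise_cons.mp h).1 l h2)

-- the state invariant for A's middle loop
theorem pvRowA_inv (linha : List Int) (j : Int) (n : Nat) (hn : n ≤ linha.length) :
    (List.range n).foldl
      (fun (st : List Int × Option Nat) casa =>
        let peça := st.1.getD casa 0
        if peça == j then
          (match st.2 with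
           | some u => pvFillLoop st.1 j u casa
           | none => st.1,
           some casa)
        else st)
      (linha, none)
    = match (pvOccs linha j n).head?, (pvOccs linha j n).getLast? with
      | some f, some l => (pvFillR linha j f l, some l)
      | _, _ => (linha, none) := by
  induction n with
  | zero => simp [pvOccs]
  | succ n ih =>
    have hn' : n < linha.length := by omega
    rw [List.range_succ, List.foldl_append, List.foldl_cons, List.foldl_nil,
        ih (by omega), pvOccs_succ]
    by_cases hj : linha.getD n 0 = j
    · have hj2 : linha[n]?.getD 0 = j := by
        rw [← List.getD_eq_getElem?_getD]; exact hj
      simp only [hj, beq_self_eq_true, if_true]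
      cases hocc : (pvOccs linha j n) with
      | nil =>
        simp [hj2, pvFillR_self linha j n hn' hj]
      | cons f rest =>
        have hf : (f :: rest).head? = some f := rfl
        obtain ⟨l, hl⟩ : ∃ l, (f :: rest).getLast? = some l :=
          ⟨(f :: rest).getLast (by simp), List.getLast?_eq_some_getLast (by simp)⟩
        have hfl : f ≤ l := pvHead_le_getLast _ (hocc ▸ pvOccs_sorted linha j n) f l hf hl
        have hln : l < n := pvOccs_mem_lt linha j n l (hocc ▸ pvMem_of_getLast? _ _ hl)
        simp only [hf, hl]
        have hget : (pvFillR linha j f l).getD n 0 = j := by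
          rw [pvFillR_getD_high linha j f l n hfl (by omega) hln]
          exact hj
        have hlast : ((f :: rest) ++ [n]).getLast? = some n := List.getLast?_concat
        have hhead : ((f :: rest) ++ [n]).head? = some f := rfl
        simp only [hhead, hlast]
        rw [pvFillR_extend linha j f l n hfl hln hn' hj]
        have hget2 : (pvFillR linha j f l)[n]?.getD 0 = j := by
          rw [← List.getD_eq_getElem?_getD]; exact hget
        simp [hget2]
    · have hjb : (linha.getD n 0 == j) = false := by simpa using hj
      have hj2 : ¬ linha[n]?.getD 0 = j := by
        rw [← List.getD_eq_getElem?_getD]; exact hj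
      simp only [hjb, Bool.false_eq_true, if_false, List.append_nil]
      cases hocc : (pvOccs linha j n) with
      | nil => simp [hj2]
      | cons f rest =>
        have hf : (f :: rest).head? = some f := rfl
        obtain ⟨l, hl⟩ : ∃ l, (f :: rest).getLast? = some l :=
          ⟨(f :: rest).getLast (by simp), List.getLast?_eq_some_getLast (by simp)⟩
        have hfl : f ≤ l := pvHead_le_getLast _ (hocc ▸ pvOccs_sorted linha j n) f l hf hl
        have hln : l < n := pvOccs_mem_lt linha j n l (hocc ▸ pvMem_of_getLast? _ _ hl)
        have hget : ¬ (pvFillR linha j f l)[n]?.getD 0 = j := by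
          rw [← List.getD_eq_getElem?_getD,
              pvFillR_getD_high linha j f l n hfl (by omega) hln]
          exact hj
        simp only [hf, hl]
        simp [hget]

-- B's comprehension over enumerate equals the occurrence-position filter
theorem pvEnum_filter_map (j : Int) (xs : List Int) (s : Nat) (full : List Int)
    (hsame : ∀ k, k < xs.length → xs.getD k 0 = full.getD (s + k) 0) :
    (((List.range' s xs.length).zip xs).filter (fun p => p.2 == j)).map Prod.fst
      = (List.range' s xs.length).filter (fun i => full.getD i 0 == j) := by
  induction xs generalizing s with
  | nil => simp
  | cons x rest ih =>
    have h0 : x = full.getD s 0 := by simpa using hsame 0 (by simp)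
    simp only [List.length_cons, List.range'_succ, List.zip_cons_cons, List.filter_cons]
    have hrec := ih (s + 1) (fun k hk => by simpa [Nat.add_assoc, Nat.add_comm 1 k] using hsame (k + 1) (by simpa using Nat.succ_lt_succ hk))
    by_cases hx : x = j
    · simp only [← h0, hx, beq_self_eq_true, if_true, List.map_cons, hrec]
    · have hb : (x == j) = false := by simpa using hx
      have hb' : ¬ full[s]?.getD 0 = j := by
        rw [← List.getD_eq_getElem?_getD, ← h0]
        simpa using hx
      simp [hb, hb', hrec]

theorem pvRow_eq (linha : List Int) (j : Int) : pvRowA linha j = pvRowB linha j := by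
  rw [pvRowA, pvRowA_inv linha j linha.length (le_refl _)]
  have hidx : ((pvEnum linha).filter (fun p => p.2 == j)).map Prod.fst
      = pvOccs linha j linha.length := by
    rw [pvEnum, List.range_eq_range', pvOccs, List.range_eq_range']
    exact pvEnum_filter_map j linha 0 linha (fun k _ => by simp)
  rw [pvRowB]
  simp only [hidx]
  cases hocc : pvOccs linha j linha.length with
  | nil => simp
  | cons f rest =>
    obtain ⟨l, hl⟩ : ∃ l, (f :: rest).getLast? = some l :=
      ⟨(f :: rest).getLast (by simp), List.getLast?_eq_some_getLast (by simp)⟩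
    have hld : (f :: rest).getLastD 0 = l := by
      rw [List.getLastD_eq_getLast?, hl]
      rfl
    simp only [List.head?_cons, hl, hld]
    rfl

-- ===== VERDICT (by name: the statement is the Claim_ definition above) =====
theorem nas_linhas_spec : Claim_equal_nas_linhas := by
  intro tabuleiro jogador jogada _
  unfold Spec_nas_linhas nas_linhas nas_linhas_alt
  exact List.map_congr_left (fun linha _ => pvRow_eq linha jogador)
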